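-- pv_equiv track=rewrite | github.com/moprules/yandex-algorithm-training_1.0 | dz5/g.py | solve
-- ===== SOURCE A (Python) =====
-- def solve(n, x, k):
--     # словарик для подсчёта карточек
--     cards = {}
--     for xi in x:
--         if xi not in cards:
--             cards[xi] = 0
--         cards[xi] += 1
--     # отсортированный массив уникальных карточек
--     uniqs = sorted(cards)
--     # указатель на правый элемент в массиве уникальных карточек
--     right = 0
--     # количество номеров с дубликатами
--     duplicates = 0
--     # переменная для результата
--     # изначально считаем, что у нас 0 комбинаций карточек
--     ans = 0
--     # перебираем левый указатель
--     for left in range(len(uniqs)):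
--         # двигаем правый указатель пока не выйдем за пределы массива
--         # или не найдём карточку, которая
--         while right < len(uniqs) and uniqs[left]*k >= uniqs[right]:
--             # если количество карточек с данным номером больше одной
--             if cards[uniqs[right]] > 1:
--                 # увеличиваем количество дубликатов
--                 duplicates += 1
--             right += 1
--
--         # расстояние между левым и правым указателем
--         len_range = right - left
--
--         if cards[uniqs[left]] >= 2:
--             # две карточки с позиции left + все остальные подходящие
--             ans += (len_range - 1) * 3
--         if cards[uniqs[left]] >= 3:
--             # все три картчки с позиции left
--             ans += 1
--         # каждая карточка уникальная
--         ans += (len_range - 1) * (len_range - 2) * 3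
--         # Если карточек на позиции left > 1
--         if cards[uniqs[left]] > 1:
--             # нужно уменьшить счётчик дубликатов
--             # так как на следующей итерации указатель left сместиться
--             # и для учёта случая ниже
--             duplicates -= 1
--         # Случай когда одная карточка на позиции left + дубликаты
--         ans += duplicates * 3
--
--     return ans
-- ===== SOURCE B (Python) =====
-- def solve(n, x, k):
--     # count occurrences of each card value
--     cnt = {}
--     for v in x:
--         cnt[v] = cnt.get(v, 0) + 1
--     u = sorted(cnt)
--     m = len(u)
--     # prefix table: dp[t] = number of indices j < t with cnt[u[j]] >= 2
--     dp = [0]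
--     for v in u:
--         dp.append(dp[-1] + (1 if cnt[v] >= 2 else 0))
--     ans = 0
--     r = 0
--     for i in range(m):
--         # binary search: first index whose value exceeds u[i]*k
--         lim = u[i] * k
--         lo, hi = 0, m
--         while lo < hi:
--             mid = (lo + hi) // 2
--             if u[mid] <= lim:
--                 lo = mid + 1
--             else:
--                 hi = mid
--         # the original pointer never moves left; keep the running maximum
--         if lo > r:
--             r = lo
--         L = r - i
--         c = cnt[u[i]]
--         if c >= 2:
--             ans += (L - 1) * 3
--         if c >= 3:
--             ans += 1
--         ans += (L - 1) * (L - 2) * 3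
--         ans += (dp[r] - dp[i + 1]) * 3
--     return ans
-- ===== Notes on version B (the rewrite author's own statement) =====
-- stated objective: alternative
-- what changed: Replaces A's monotone two-pointer sweep with a running duplicates accumulator by, per minimum value, a hand-written binary search for the cut point (kept as a running maximum) plus a precomputed prefix table of duplicate counts read at two positions.
import Mathlib
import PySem

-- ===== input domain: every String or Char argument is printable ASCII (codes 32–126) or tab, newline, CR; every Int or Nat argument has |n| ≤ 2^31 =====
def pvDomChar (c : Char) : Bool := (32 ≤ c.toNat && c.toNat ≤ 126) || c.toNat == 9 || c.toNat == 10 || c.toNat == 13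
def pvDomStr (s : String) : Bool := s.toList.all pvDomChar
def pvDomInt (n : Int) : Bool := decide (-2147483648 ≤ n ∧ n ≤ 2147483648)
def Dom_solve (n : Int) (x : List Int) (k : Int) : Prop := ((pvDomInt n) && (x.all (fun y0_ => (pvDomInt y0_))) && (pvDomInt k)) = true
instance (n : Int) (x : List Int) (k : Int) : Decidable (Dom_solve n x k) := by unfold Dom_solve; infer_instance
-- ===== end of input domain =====

-- B replaces A's monotone two-pointer with a running-duplicates accumulator by a
-- per-index binary search plus a prefix table of duplicate counts (objective: alternative).

-- ===== PORT A =====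
-- cards = {}; for xi in x: if xi not in cards: cards[xi] = 0; cards[xi] += 1
-- (cards[xi] += 1 reads a key that is always present at that point)
def buildCardsA (x : List Int) : PySem.Dict Int Int :=
  x.foldl (fun d xi =>
    let d1 := if d.contains xi then d else d.insert xi 0
    d1.insert xi (d1.getD xi 0 + 1)) PySem.Dict.empty

-- the while loop: advance `right` while in range and uniqs[left]*k >= uniqs[right],
-- counting values with more than one card
def whileRightA (u : List Int) (cards : PySem.Dict Int Int) (lim : Int)
    (right : Nat) (dup : Int) : Nat × Int :=
  if h : right < u.length ∧ lim ≥ u.getD right 0 then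
    whileRightA u cards lim (right + 1)
      (if cards.getD (u.getD right 0) 0 > 1 then dup + 1 else dup)
  else (right, dup)
termination_by u.length - right
decreasing_by omega

-- body of `for left in range(len(uniqs))`; state = (right, duplicates, ans)
def stepA (u : List Int) (cards : PySem.Dict Int Int) (k : Int)
    (st : Nat × Int × Int) (left : Nat) : Nat × Int × Int :=
  let (right, dup, ans) := st
  let rd := whileRightA u cards (u.getD left 0 * k) right dup
  let right := rd.1
  let dup := rd.2
  let lenRange : Int := (right : Int) - (left : Int)
  let c := cards.getD (u.getD left 0) 0
  let ans := if c ≥ 2 then ans + (lenRange - 1) * 3 else ans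
  let ans := if c ≥ 3 then ans + 1 else ans
  let ans := ans + (lenRange - 1) * (lenRange - 2) * 3
  let dup := if c > 1 then dup - 1 else dup
  let ans := ans + dup * 3
  (right, dup, ans)

def solve (n : Int) (x : List Int) (k : Int) : Int :=
  let cards := buildCardsA x
  let uniqs := PySem.List.sorted cards.keys (fun v => v) false
  ((List.range uniqs.length).foldl (stepA uniqs cards k) (0, 0, 0)).2.2

-- ===== PORT B =====
-- cnt = {}; for v in x: cnt[v] = cnt.get(v, 0) + 1
def buildCntB (x : List Int) : PySem.Dict Int Int :=
  x.foldl (fun d v => d.insert v (d.getD v 0 + 1)) PySem.Dict.empty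

-- dp = [0]; for v in u: dp.append(dp[-1] + (1 if cnt[v] >= 2 else 0))
def buildDpB (cnt : PySem.Dict Int Int) (u : List Int) : List Int :=
  u.foldl (fun dp v =>
    dp ++ [PySem.List.pyGetD dp (-1) 0 + (if cnt.getD v 0 ≥ 2 then (1 : Int) else 0)]) [(0 : Int)]

-- hand-written binary search from Source B: first index in [lo, hi) whose value exceeds lim
def bsB (u : List Int) (lim : Int) (lo hi : Nat) : Nat :=
  if h : lo < hi then
    let mid := (lo + hi) / 2
    if u.getD mid 0 ≤ lim then bsB u lim (mid + 1) hi else bsB u lim lo mid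
  else lo
termination_by hi - lo
decreasing_by all_goals omega

-- body of `for i in range(m)`; state = (r, ans)
def stepB (u : List Int) (cnt : PySem.Dict Int Int) (dp : List Int) (k : Int)
    (st : Nat × Int) (i : Nat) : Nat × Int :=
  let (r, ans) := st
  let lim := u.getD i 0 * k
  let lo := bsB u lim 0 u.length
  let r := if lo > r then lo else r
  let L : Int := (r : Int) - (i : Int)
  let c := cnt.getD (u.getD i 0) 0
  let ans := if c ≥ 2 then ans + (L - 1) * 3 else ans
  let ans := if c ≥ 3 then ans + 1 else ans
  let ans := ans + (L - 1) * (L - 2) * 3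
  let ans := ans + (dp.getD r 0 - dp.getD (i + 1) 0) * 3
  (r, ans)

def solve_alt (n : Int) (x : List Int) (k : Int) : Int :=
  let cnt := buildCntB x
  let u := PySem.List.sorted cnt.keys (fun v => v) false
  let dp := buildDpB cnt u
  ((List.range u.length).foldl (stepB u cnt dp k) (0, 0)).2

-- ===== PRECONDITION & SPEC =====
def Spec_solve (n : Int) (x : List Int) (k : Int) (out : Int) : Prop := out = solve_alt n x k
instance (n : Int) (x : List Int) (k : Int) (out : Int) : Decidable (Spec_solve n x k out) := by unfold Spec_solve; infer_instance

-- ===== CLAIM (what is proved, stated in full; the proofs are below) =====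
def Claim_equal_solve : Prop := ∀ (n : Int) (x : List Int) (k : Int), Dom_solve n x k → Spec_solve n x k (solve n x k)

-- ===== LEMMAS AND PROOFS =====

-- the two count-building folds produce the same dict
theorem cards_eq_cnt (x : List Int) : buildCardsA x = buildCntB x := by
  unfold buildCardsA buildCntB
  congr 1
  funext d xi
  by_cases h : d.contains xi = true
  · simp [h]
  · have hg : d.getD xi (0 : Int) = 0 :=
      PySem.Dict.getD_of_not_contains d 0 (by simpa using h)
    simp [h, PySem.Dict.getD_insert_self, PySem.Dict.insert_insert_self, hg]

-- countP of values with ≥ 2 cards among the first t entries of u, as an Int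
def cg2 (cnt : PySem.Dict Int Int) (u : List Int) (t : Nat) : Int :=
  ((u.take t).countP (fun v => decide (cnt.getD v 0 ≥ 2)) : Int)

-- characterisation of the cut point on a sorted list
theorem sorted_count_char (u : List Int) (hpw : u.Pairwise (· ≤ ·)) (lim : Int)
    (j : Nat) (hj : j < u.length) :
    u[j] ≤ lim ↔ j < u.countP (fun v => decide (v ≤ lim)) := by
  induction u generalizing j with
  | nil => simp at hj
  | cons a t ih =>
    have ha : ∀ b ∈ t, a ≤ b := fun b hb => List.rel_of_pairwise_cons hpw hb
    have hpt : t.Pairwise (· ≤ ·) := hpw.of_cons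
    cases j with
    | zero =>
      simp only [List.getElem_cons_zero, List.countP_cons]
      constructor
      · intro h; simp [h]
      · intro h
        by_contra hc
        have hz : t.countP (fun v => decide (v ≤ lim)) = 0 := by
          rw [List.countP_eq_zero]
          intro b hb
          simp only [decide_eq_true_eq]
          intro hble
          exact hc (le_trans (ha b hb) hble)
        simp [hz, hc] at h
    | succ j =>
      simp only [List.getElem_cons_succ, List.countP_cons]
      have hj' : j < t.length := by simpa using hj
      rw [ih hpt j hj']
      by_cases hA : a ≤ lim
      · simp [hA]
      · have hz : t.countP (fun v => decide (v ≤ lim)) = 0 := by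
          rw [List.countP_eq_zero]
          intro b hb
          simp only [decide_eq_true_eq]
          intro hble
          exact hA (le_trans (ha b hb) hble)
        simp [hz, hA]

theorem cg2_succ (cnt : PySem.Dict Int Int) (u : List Int) (s : Nat) (hs : s < u.length) :
    cg2 cnt u (s + 1) = cg2 cnt u s + (if cnt.getD (u[s]) 0 ≥ 2 then 1 else 0) := by
  unfold cg2
  rw [List.take_add_one, List.getElem?_eq_getElem hs]
  simp only [Option.toList_some, List.countP_append, List.countP_singleton]
  by_cases h : cnt.getD u[s] 0 ≥ 2 <;> simp [h]

theorem bsB_eq (u : List Int) (hpw : u.Pairwise (· ≤ ·)) (lim : Int) :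
    ∀ n lo hi, hi - lo ≤ n → lo ≤ u.countP (fun v => decide (v ≤ lim)) →
      u.countP (fun v => decide (v ≤ lim)) ≤ hi → hi ≤ u.length →
      bsB u lim lo hi = u.countP (fun v => decide (v ≤ lim)) := by
  intro n
  induction n with
  | zero =>
    intro lo hi h1 h2 h3 h4
    rw [bsB]
    have : ¬ lo < hi := by omega
    simp only [this, dif_neg, not_false_iff]
    omega
  | succ n ih =>
    intro lo hi h1 h2 h3 h4
    rw [bsB]
    by_cases hlh : lo < hi
    · simp only [dif_pos hlh]
      have hmid : (lo + hi) / 2 < u.length := by omega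
      have hgd : u.getD ((lo + hi) / 2) 0 = u[(lo + hi) / 2] := List.getD_eq_getElem u 0 hmid
      have hchar := sorted_count_char u hpw lim ((lo + hi) / 2) hmid
      by_cases hc : u.getD ((lo + hi) / 2) 0 ≤ lim
      · rw [if_pos hc]
        have hT : (lo + hi) / 2 < u.countP (fun v => decide (v ≤ lim)) := by
          rw [← hchar, ← hgd]; exact hc
        exact ih ((lo + hi) / 2 + 1) hi (by omega) (by omega) h3 h4
      · rw [if_neg hc]
        have hT : u.countP (fun v => decide (v ≤ lim)) ≤ (lo + hi) / 2 := by
          by_contra hcon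
          exact hc (hgd ▸ hchar.mpr (by omega))
        exact ih lo ((lo + hi) / 2) (by omega) h2 hT (by omega)
    · simp only [dif_neg hlh]
      omega

theorem whileRightA_eq (u : List Int) (cards : PySem.Dict Int Int) (lim : Int)
    (hpw : u.Pairwise (· ≤ ·)) :
    ∀ n right dup, u.length - right ≤ n → right ≤ u.length →
      whileRightA u cards lim right dup
        = (max right (u.countP (fun v => decide (v ≤ lim))),
           dup + (cg2 cards u (max right (u.countP (fun v => decide (v ≤ lim)))) - cg2 cards u right)) := by
  intro n
  induction n with
  | zero =>
    intro right dup h1 h2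
    have hr : right = u.length := by omega
    rw [whileRightA]
    have hn : ¬ (right < u.length ∧ lim ≥ u.getD right 0) := by
      rintro ⟨h, -⟩; omega
    rw [dif_neg hn]
    have hT : u.countP (fun v => decide (v ≤ lim)) ≤ right := hr ▸ List.countP_le_length
    have hmax : max right (u.countP (fun v => decide (v ≤ lim))) = right := by omega
    rw [hmax]; simp
  | succ n ih =>
    intro right dup h1 h2
    rw [whileRightA]
    by_cases hcond : right < u.length ∧ lim ≥ u.getD right 0
    · rw [dif_pos hcond]
      obtain ⟨hlt, hle⟩ := hcond
      have hgd : u.getD right 0 = u[right] := List.getD_eq_getElem u 0 hlt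
      have hT : right < u.countP (fun v => decide (v ≤ lim)) :=
        (sorted_count_char u hpw lim right hlt).mp (by rw [← hgd]; exact hle)
      rw [ih (right + 1) _ (by omega) (by omega)]
      have hmax1 : max (right + 1) (u.countP (fun v => decide (v ≤ lim)))
          = max right (u.countP (fun v => decide (v ≤ lim))) := by omega
      rw [hmax1]
      have hstep := cg2_succ cards u right hlt
      rw [hgd]
      refine Prod.ext_iff.mpr ⟨rfl, ?_⟩
      rw [hstep]
      by_cases hd : cards.getD u[right] 0 > 1
      · have hd2 : cards.getD u[right] 0 ≥ 2 := by omega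
        rw [if_pos hd, if_pos hd2]; ring
      · have hd2 : ¬ cards.getD u[right] 0 ≥ 2 := by omega
        rw [if_neg hd, if_neg hd2]; ring
    · rw [dif_neg hcond]
      have hT : u.countP (fun v => decide (v ≤ lim)) ≤ right := by
        by_cases hlt : right < u.length
        · have hge : ¬ lim ≥ u.getD right 0 := fun h => hcond ⟨hlt, h⟩
          have hgd : u.getD right 0 = u[right] := List.getD_eq_getElem u 0 hlt
          by_contra hcon
          exact hge (by rw [hgd]; exact (sorted_count_char u hpw lim right hlt).mpr (by omega))
        · calc u.countP (fun v => decide (v ≤ lim)) ≤ u.length := List.countP_le_length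
            _ ≤ right := by omega
      have hmax : max right (u.countP (fun v => decide (v ≤ lim))) = right := by omega
      rw [hmax]; simp

-- the dp table built by B is the prefix-count table
theorem dp_eq (cnt : PySem.Dict Int Int) (u : List Int) :
    buildDpB cnt u = (List.range (u.length + 1)).map (cg2 cnt u) := by
  unfold buildDpB
  induction u using List.reverseRecOn with
  | nil => simp [cg2]
  | append_singleton u v ih =>
    rw [List.foldl_append, List.foldl_cons, List.foldl_nil, ih]
    have hL : (List.range (u.length + 1)).map (cg2 cnt u)
        = (List.range u.length).map (cg2 cnt u) ++ [cg2 cnt u u.length] := by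
      rw [List.range_succ, List.map_append]; rfl
    rw [hL, PySem.List.pyGetD_neg_one_append_singleton]
    have hlen : (u ++ [v]).length + 1 = (u.length + 1) + 1 := by simp
    rw [hlen, List.range_succ (n := u.length + 1), List.map_append,
      List.range_succ (n := u.length), List.map_append]
    have hmid : cg2 cnt (u ++ [v]) u.length = cg2 cnt u u.length := by
      unfold cg2
      rw [List.take_append_of_le_length (by omega)]
    have hlast : cg2 cnt (u ++ [v]) (u.length + 1)
        = cg2 cnt u u.length + (if cnt.getD v 0 ≥ 2 then 1 else 0) := by
      unfold cg2
      rw [List.take_of_length_le (by simp), List.take_of_length_le (by omega),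
        List.countP_append, List.countP_singleton]
      push_cast
      by_cases h : cnt.getD v 0 ≥ 2 <;> simp [h]
    congr 1
    · congr 1
      · apply List.map_congr_left
        intro t ht
        rw [List.mem_range] at ht
        unfold cg2
        rw [List.take_append_of_le_length (by omega)]
      · simp [hmid]
    · simp [hlast]

theorem loops_eq (u : List Int) (cnt : PySem.Dict Int Int) (k : Int)
    (hpw : u.Pairwise (· ≤ ·)) :
    ∀ cntLeft s (right : Nat) (dup ans : Int), s + cntLeft = u.length → right ≤ u.length →
      dup = cg2 cnt u right - cg2 cnt u s →
      ((List.range' s cntLeft).foldl (stepA u cnt k) (right, dup, ans)).2.2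
        = ((List.range' s cntLeft).foldl
            (stepB u cnt ((List.range (u.length + 1)).map (cg2 cnt u)) k) (right, ans)).2 := by
  intro cntLeft
  induction cntLeft with
  | zero => intro s right dup ans _ _ _; simp
  | succ cl ih =>
    intro s right dup ans hsum hr hdup
    rw [List.range'_succ, List.foldl_cons, List.foldl_cons]
    have hs : s < u.length := by omega
    have hTle : u.countP (fun v => decide (v ≤ u.getD s 0 * k)) ≤ u.length := List.countP_le_length
    have hbs : bsB u (u.getD s 0 * k) 0 u.length = u.countP (fun v => decide (v ≤ u.getD s 0 * k)) :=
      bsB_eq u hpw _ u.length 0 u.length (by omega) (by omega) hTle le_rfl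
    have hwh := whileRightA_eq u cnt (u.getD s 0 * k) hpw u.length right dup (by omega) hr
    -- the common new pointer
    set R := max right (u.countP (fun v => decide (v ≤ u.getD s 0 * k))) with hR
    have hRlen : R ≤ u.length := by omega
    -- the common new duplicates value
    have hgds : u.getD s 0 = u[s] := List.getD_eq_getElem u 0 hs
    have hcg := cg2_succ cnt u s hs
    have hDnew : (if cnt.getD (u.getD s 0) 0 > 1
          then dup + (cg2 cnt u R - cg2 cnt u right) - 1
          else dup + (cg2 cnt u R - cg2 cnt u right))
        = cg2 cnt u R - cg2 cnt u (s + 1) := by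
      rw [hgds] at *
      by_cases hc : cnt.getD (u[s]) 0 > 1
      · have hc2 : cnt.getD (u[s]) 0 ≥ 2 := by omega
        rw [if_pos hc, hdup, hcg, if_pos hc2]; ring
      · have hc2 : ¬ cnt.getD (u[s]) 0 ≥ 2 := by omega
        rw [if_neg hc, hdup, hcg, if_neg hc2]; ring
    -- evaluate one step of A
    have hA : stepA u cnt k (right, dup, ans) s
        = (R, cg2 cnt u R - cg2 cnt u (s + 1),
           ((if cnt.getD (u.getD s 0) 0 ≥ 2
              then ans + (((R : Int) - (s : Int)) - 1) * 3 else ans)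
            + (if cnt.getD (u.getD s 0) 0 ≥ 3 then 1 else 0)
            + (((R : Int) - (s : Int)) - 1) * (((R : Int) - (s : Int)) - 2) * 3
            + (cg2 cnt u R - cg2 cnt u (s + 1)) * 3)) := by
      simp only [stepA, hwh]
      refine Prod.ext_iff.mpr ⟨rfl, Prod.ext_iff.mpr ⟨?_, ?_⟩⟩
      · simpa using hDnew
      · rw [← hDnew]
        by_cases hc : cnt.getD (u.getD s 0) 0 > 1 <;>
          by_cases hc2 : cnt.getD (u.getD s 0) 0 ≥ 2 <;>
          by_cases hc3 : cnt.getD (u.getD s 0) 0 ≥ 3 <;>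
          first
          | (exfalso; omega)
          | (simp only [hc, hc2, hc3, ite_true, ite_false]; try ring)
    -- evaluate one step of B
    have hB : stepB u cnt ((List.range (u.length + 1)).map (cg2 cnt u)) k (right, ans) s
        = (R,
           ((if cnt.getD (u.getD s 0) 0 ≥ 2
              then ans + (((R : Int) - (s : Int)) - 1) * 3 else ans)
            + (if cnt.getD (u.getD s 0) 0 ≥ 3 then 1 else 0)
            + (((R : Int) - (s : Int)) - 1) * (((R : Int) - (s : Int)) - 2) * 3
            + (cg2 cnt u R - cg2 cnt u (s + 1)) * 3)) := by
      simp only [stepB, hbs]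
      have hmax : (if u.countP (fun v => decide (v ≤ u.getD s 0 * k)) > right
          then u.countP (fun v => decide (v ≤ u.getD s 0 * k)) else right) = R := by
        rw [hR]; split <;> omega
      rw [hmax]
      refine Prod.ext_iff.mpr ⟨rfl, ?_⟩
      rw [PySem.List.getD_map_range _ _ _ _ (by omega), PySem.List.getD_map_range _ _ _ _ (by omega)]
      by_cases hc2 : cnt.getD (u.getD s 0) 0 ≥ 2 <;>
        by_cases hc3 : cnt.getD (u.getD s 0) 0 ≥ 3 <;>
        first
        | (exfalso; omega)
        | (simp only [hc2, hc3, ite_true, ite_false]; try ring)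
    rw [hA, hB]
    exact ih (s + 1) R (cg2 cnt u R - cg2 cnt u (s + 1)) _ (by omega) hRlen rfl

-- ===== VERDICT (by name: the statement is the Claim_ definition above) =====
theorem solve_spec : Claim_equal_solve := by
  intro n x k _
  show solve n x k = solve_alt n x k
  simp only [solve, solve_alt]
  rw [cards_eq_cnt, dp_eq]
  have hpw := PySem.List.sorted_pairwise
    (xs := (buildCntB x).keys)
    (key := fun v => v)
  rw [show List.range (PySem.List.sorted (buildCntB x).keys (fun v => v) false).length
        = List.range' 0 (PySem.List.sorted (buildCntB x).keys (fun v => v) false).length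
      from List.range_eq_range']
  exact loops_eq (PySem.List.sorted (buildCntB x).keys (fun v => v) false) (buildCntB x) k hpw
    (PySem.List.sorted (buildCntB x).keys (fun v => v) false).length 0 0 0 0
    (by omega) (by omega) (by simp [cg2])
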